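-- pv_equiv track=rewrite | github.com/adrianritchie/TriangleSolitaireSolution | game.py | calcValidMoves
-- ===== SOURCE A (Python) =====
-- def calcValidMoves(rows):
--     levels = []
--     counter = 0
--     moves = []
--
--     for i in range(1, rows+1):
--         if i == 0: continue
--         level = []
--         for j in range(i):
--             level.append(counter)
--             counter += 1
--         levels.append(level)
--
--     for l in range(rows):
--         for p in range(l+1):
--             #down-left
--             if l < rows-2: moves.append( ( levels[l][p], levels[l+1][p], levels[l+2][p] ) )
--
--             #down-right
--             if l < rows-2: moves.append( ( levels[l][p], levels[l+1][p+1], levels[l+2][p+2] ) )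
--
--             #right
--             if p < l-1: moves.append( ( levels[l][p], levels[l][p+1], levels[l][p+2] ) )
--
--     reverse_moves = []
--     for m in moves:
--         reverse_moves.append(m[::-1])
--     moves += reverse_moves
--     return moves
-- ===== SOURCE B (Python) =====
-- def calcValidMoves(rows):
--     # Single flat pass over peg indices 0..n-1 tracking (row, pos) incrementally;
--     # no index table, and the reversed moves are accumulated alongside the forward
--     # ones in the same pass instead of a separate reversal pass.
--     n = rows * (rows + 1) // 2 if rows > 0 else 0
--     fwd = []
--     rev = []
--     l = 0
--     p = 0
--     for i in range(n):
--         if l < rows - 2: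
--             d = i + l + 1          # peg directly below-left: next row, same pos
--             fwd.append((i, d, d + l + 2))
--             rev.append((d + l + 2, d, i))
--             fwd.append((i, d + 1, d + l + 4))
--             rev.append((d + l + 4, d + 1, i))
--         if p < l - 1:
--             fwd.append((i, i + 1, i + 2))
--             rev.append((i + 2, i + 1, i))
--         p += 1
--         if p > l:
--             l += 1
--             p = 0
--     return fwd + rev
-- ===== Notes on version B (the rewrite author's own statement) =====
-- stated objective: alternative
-- what changed: Replaces A's three staged passes (build a levels index table, double (row,pos) loop over the table, then a separate reversal pass) by one flat loop over the peg index 0..n-1 that tracks the (row,pos) coordinates incrementally and accumulates forward and reversed moves simultaneously, with neighbour indices obtained by row-offset arithmetic.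
import Mathlib
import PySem

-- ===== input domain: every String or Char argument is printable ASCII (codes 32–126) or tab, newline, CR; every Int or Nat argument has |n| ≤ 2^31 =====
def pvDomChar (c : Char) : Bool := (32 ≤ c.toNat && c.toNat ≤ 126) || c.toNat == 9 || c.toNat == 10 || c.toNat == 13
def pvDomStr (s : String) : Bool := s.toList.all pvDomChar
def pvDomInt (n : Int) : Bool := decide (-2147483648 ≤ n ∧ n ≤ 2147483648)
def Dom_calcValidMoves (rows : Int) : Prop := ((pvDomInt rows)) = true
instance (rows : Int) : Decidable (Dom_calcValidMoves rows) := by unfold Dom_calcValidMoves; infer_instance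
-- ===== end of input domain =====

-- B replaces A's three staged passes (levels table, double (row,pos) loop, reversal pass)
-- by one flat loop over the peg index that tracks (row,pos) incrementally and accumulates
-- the forward and reversed moves simultaneously; objective: alternative (same cost).

-- ===== PORT A =====
-- levels[l][p]; every access A performs is in range, so the defaults are never used.
def aGet (levels : List (List Int)) (l p : Int) : Int :=
  PySem.List.pyGetD (PySem.List.pyGetD levels l []) p 0

-- body of A's first loop: builds one level of `counter`s and threads the counter
def aLevelStep (st : List (List Int) × Int) (i : Int) : List (List Int) × Int :=
  if i == 0 then st   -- 'if i == 0: continue' (never fires: i starts at 1)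
  else
    let inner := (PySem.List.pyRange 0 i 1).foldl
      (fun (lv : List Int × Int) _j => (lv.1 ++ [lv.2], lv.2 + 1)) ([], st.2)
    (st.1 ++ [inner.1], inner.2)

-- body of A's second (double) loop over (l, p)
def aMoveStep (rows : Int) (levels : List (List Int)) (acc : List (Int × Int × Int))
    (l p : Int) : List (Int × Int × Int) :=
  let acc := if l < rows - 2 then
      acc ++ [(aGet levels l p, aGet levels (l+1) p, aGet levels (l+2) p)] else acc
  let acc := if l < rows - 2 then
      acc ++ [(aGet levels l p, aGet levels (l+1) (p+1), aGet levels (l+2) (p+2))] else acc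
  if p < l - 1 then
    acc ++ [(aGet levels l p, aGet levels l (p+1), aGet levels l (p+2))] else acc

def calcValidMoves (rows : Int) : List (Int × Int × Int) :=
  let st := (PySem.List.pyRange 1 (rows + 1) 1).foldl aLevelStep ([], 0)
  let levels := st.1
  let moves := (PySem.List.pyRange 0 rows 1).foldl
    (fun acc l => (PySem.List.pyRange 0 (l + 1) 1).foldl
      (fun acc p => aMoveStep rows levels acc l p) acc) []
  -- m[::-1] on a 3-tuple reverses it (ported by hand; exact for triples)
  let reverse_moves := moves.foldl
    (fun acc (m : Int × Int × Int) => acc ++ [(m.2.2, m.2.1, m.1)]) []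
  moves ++ reverse_moves

-- ===== PORT B =====
-- body of B's single loop over the flat peg index i, state (fwd, rev, l, p)
def bStep (rows : Int)
    (st : List (Int × Int × Int) × List (Int × Int × Int) × Int × Int) (i : Int) :
    List (Int × Int × Int) × List (Int × Int × Int) × Int × Int :=
  match st with
  | (fwd, rev, l, p) =>
    let d := i + l + 1
    let fwd := if l < rows - 2 then
        fwd ++ [(i, d, d + l + 2), (i, d + 1, d + l + 4)] else fwd
    let rev := if l < rows - 2 then
        rev ++ [(d + l + 2, d, i), (d + l + 4, d + 1, i)] else rev
    let fwd := if p < l - 1 then fwd ++ [(i, i + 1, i + 2)] else fwd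
    let rev := if p < l - 1 then rev ++ [(i + 2, i + 1, i)] else rev
    if p + 1 > l then (fwd, rev, l + 1, 0) else (fwd, rev, l, p + 1)

def calcValidMoves_alt (rows : Int) : List (Int × Int × Int) :=
  let n := if rows > 0 then PySem.Int.floordiv (rows * (rows + 1)) 2 else 0
  let st := (PySem.List.pyRange 0 n 1).foldl (bStep rows) ([], [], 0, 0)
  st.1 ++ st.2.1

-- ===== PRECONDITION & SPEC =====
def Spec_calcValidMoves (rows : Int) (out : List (Int × Int × Int)) : Prop := out = calcValidMoves_alt rows
instance (rows : Int) (out : List (Int × Int × Int)) : Decidable (Spec_calcValidMoves rows out) := by unfold Spec_calcValidMoves; infer_instance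

-- ===== CLAIM (what is proved, stated in full; the proofs are below) =====
def Claim_equal_calcValidMoves : Prop := ∀ (rows : Int), Dom_calcValidMoves rows → Spec_calcValidMoves rows (calcValidMoves rows)

-- ===== LEMMAS AND PROOFS =====

def triB (l : Int) : Int := PySem.Int.floordiv (l * (l + 1)) 2

def r3 (m : Int × Int × Int) : Int × Int × Int := (m.2.2, m.2.1, m.1)

-- the moves that peg i = triB l + p contributes, in emission order
def emitF (rows l p i : Int) : List (Int × Int × Int) :=
  (if l < rows - 2 then
      [(i, i + l + 1, i + l + 1 + l + 2), (i, i + l + 1 + 1, i + l + 1 + l + 4)] else [])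
  ++ (if p < l - 1 then [(i, i + 1, i + 2)] else [])

def rowT (rows l p : Int) : List (Int × Int × Int) :=
  (PySem.List.pyRange p (l + 1) 1).flatMap (fun q => emitF rows l q (triB l + q))

def Fw (rows : Int) (n : Nat) : List (Int × Int × Int) :=
  (PySem.List.pyRange 0 (n : Int) 1).flatMap (fun l => rowT rows l 0)

theorem triB_succ (l : Int) : triB (l + 1) = triB l + l + 1 := by
  rcases Int.even_mul_succ_self l with ⟨k, hk⟩
  have h2 : (l + 1) * (l + 2) = (k + k) + 2 * l + 2 := by linear_combination hk
  unfold triB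
  rw [PySem.Int.floordiv_eq_ediv_of_pos (by norm_num),
      PySem.Int.floordiv_eq_ediv_of_pos (by norm_num)]
  have h3 : (l + 1) * ((l + 1) + 1) = (l + 1) * (l + 2) := by ring
  rw [h3, h2, hk]
  omega

theorem triB_nonneg (l : Int) (hl : 0 ≤ l) : 0 ≤ triB l := by
  unfold triB
  rw [PySem.Int.floordiv_eq_ediv_of_pos (by norm_num)]
  exact Int.ediv_nonneg (by nlinarith) (by norm_num)

theorem bStep_char (rows : Int) (F R : List (Int × Int × Int)) (l p i : Int) :
    bStep rows (F, R, l, p) i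
    = (F ++ emitF rows l p i, R ++ (emitF rows l p i).map r3,
       if p + 1 > l then ((l + 1 : Int), (0 : Int)) else (l, p + 1)) := by
  simp only [bStep, emitF]
  split_ifs <;> simp [r3]

theorem rowFold (rows l : Int) (k : Nat) : ∀ (p : Int), 0 ≤ p → p + k = l →
    ∀ (F R : List (Int × Int × Int)),
    (PySem.List.pyRange (triB l + p) (triB l + l + 1) 1).foldl (bStep rows) (F, R, l, p)
    = (F ++ rowT rows l p, R ++ (rowT rows l p).map r3, l + 1, 0) := by
  induction k with
  | zero =>
    intro p hp hk F R
    have hpl : p = l := by omega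
    rw [PySem.List.pyRange_one_cons (by omega)]
    simp only [List.foldl_cons, bStep_char]
    rw [if_pos (by omega), PySem.List.pyRange_one_eq_nil (by omega)]
    simp only [List.foldl_nil]
    have hT : rowT rows l p = emitF rows l p (triB l + p) := by
      unfold rowT
      rw [PySem.List.pyRange_one_cons (by omega),
          PySem.List.pyRange_one_eq_nil (by omega)]
      simp
    rw [hT]
  | succ k ih =>
    intro p hp hk F R
    rw [PySem.List.pyRange_one_cons (by omega)]
    simp only [List.foldl_cons, bStep_char]
    rw [if_neg (by omega)]
    have hstep := ih (p + 1) (by omega) (by omega)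
      (F ++ emitF rows l p (triB l + p)) (R ++ (emitF rows l p (triB l + p)).map r3)
    rw [show triB l + p + 1 = triB l + (p + 1) by ring] at *
    rw [hstep]
    have hT : rowT rows l p = emitF rows l p (triB l + p) ++ rowT rows l (p + 1) := by
      unfold rowT
      rw [PySem.List.pyRange_one_cons (by omega)]
      simp
    rw [hT]
    simp [List.append_assoc]

theorem flatFold (rows : Int) (n : Nat) :
    (PySem.List.pyRange 0 (triB (n : Int)) 1).foldl (bStep rows) ([], [], 0, 0)
    = (Fw rows n, (Fw rows n).map r3, (n : Int), 0) := by
  induction n with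
  | zero =>
    rw [show triB ((0 : Nat) : Int) = 0 by decide]
    rw [PySem.List.pyRange_one_eq_nil (by omega)]
    simp [Fw, PySem.List.pyRange_one_eq_nil]
  | succ m ih =>
    have hsucc : triB ((m : Int) + 1) = triB (m : Int) + (m : Int) + 1 := triB_succ _
    have hnn : 0 ≤ triB (m : Int) := triB_nonneg _ (by positivity)
    rw [show ((m + 1 : Nat) : Int) = (m : Int) + 1 by push_cast; ring, hsucc,
        PySem.List.pyRange_one_append 0 (triB (m : Int)) (triB (m : Int) + (m : Int) + 1)
          hnn (by omega),
        List.foldl_append, ih]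
    have hrow := rowFold rows (m : Int) m 0 (by omega) (by omega)
      (Fw rows m) ((Fw rows m).map r3)
    rw [show triB (m : Int) + 0 = triB (m : Int) by ring] at hrow
    rw [hrow]
    have hFw : Fw rows (m + 1) = Fw rows m ++ rowT rows (m : Int) 0 := by
      unfold Fw
      rw [show ((m + 1 : Nat) : Int) = (m : Int) + 1 by push_cast; ring,
          PySem.List.pyRange_one_succ_right (by positivity)]
      simp
    rw [hFw]
    simp

-- ===== A-side lemmas (levels table) =====

theorem innerLoop (n : Nat) (lv0 : List Int) (c : Int) :
    (PySem.List.pyRange 0 (n : Int) 1).foldl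
      (fun (lv : List Int × Int) _j => (lv.1 ++ [lv.2], lv.2 + 1)) (lv0, c)
    = (lv0 ++ PySem.List.pyRange c (c + n) 1, c + n) := by
  induction n with
  | zero => simp [PySem.List.pyRange_one_eq_nil]
  | succ m ih =>
    rw [show ((m + 1 : Nat) : Int) = (m : Int) + 1 by push_cast; ring,
        PySem.List.pyRange_one_succ_right (by positivity), List.foldl_append, ih]
    simp only [List.foldl_cons, List.foldl_nil]
    rw [show c + ((m : Int) + 1) = (c + m) + 1 by ring,
        PySem.List.pyRange_one_succ_right (by omega)]
    simp [List.append_assoc]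

def tbl (n : Nat) : List (List Int) :=
  (List.range n).map (fun l : Nat => PySem.List.pyRange (triB (l : Int)) (triB (l : Int) + (l : Int) + 1) 1)

theorem levelsLoop (n : Nat) :
    (PySem.List.pyRange 1 ((n : Int) + 1) 1).foldl aLevelStep ([], 0)
    = (tbl n, triB (n : Int)) := by
  induction n with
  | zero => simp [PySem.List.pyRange_one_eq_nil, tbl, triB, PySem.Int.floordiv]
  | succ m ih =>
    rw [show ((m + 1 : Nat) : Int) + 1 = ((m : Int) + 1) + 1 by push_cast; ring,
        PySem.List.pyRange_one_succ_right (by omega), List.foldl_append, ih]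
    simp only [List.foldl_cons, List.foldl_nil, aLevelStep]
    rw [if_neg (by simp; omega)]
    have hin := innerLoop (m + 1) [] (triB (m : Int))
    push_cast at hin ⊢
    rw [hin]
    simp only [tbl, List.range_succ, List.map_append, List.map_cons, List.map_nil,
      List.nil_append, Prod.mk.injEq]
    refine ⟨?_, by rw [triB_succ]; ring⟩
    rw [show triB (m : Int) + ((m : Int) + 1) = triB (m : Int) + (m : Int) + 1 by ring]

theorem aGet_tbl (n : Nat) (l p : Int) (hl : 0 ≤ l) (hln : l < (n : Int))
    (hp : 0 ≤ p) (hpl : p ≤ l) : aGet (tbl n) l p = triB l + p := by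
  unfold aGet
  have hrow : PySem.List.pyGetD (tbl n) l []
      = PySem.List.pyRange (triB l) (triB l + l + 1) 1 := by
    rw [PySem.List.pyGetD_eq_getElem (tbl n) [] hl (by simp [tbl]; omega)]
    simp only [tbl, List.getElem_map, List.getElem_range]
    congr 1 <;> rw [Int.toNat_of_nonneg hl]
  rw [hrow, PySem.List.pyGetD_eq_getElem _ 0 hp (by simp [PySem.List.length_pyRange_one]; omega)]
  rw [PySem.List.getElem_pyRange_one]
  rw [Int.toNat_of_nonneg hp]

theorem aMoveStep_emit (rows : Int) (n : Nat) (l p : Int) (hl : 0 ≤ l)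
    (hln : l < (n : Int)) (hn : rows = (n : Int)) (hp : 0 ≤ p) (hpl : p < l + 1)
    (acc : List (Int × Int × Int)) :
    aMoveStep rows (tbl n) acc l p = acc ++ emitF rows l p (triB l + p) := by
  have s1 : triB (l + 1) = triB l + l + 1 := triB_succ l
  have s2 : triB (l + 2) = triB (l + 1) + (l + 1) + 1 := by
    have := triB_succ (l + 1); rw [show l + 1 + 1 = l + 2 by ring] at this; exact this
  have a1 : triB (l + 1) + p = triB l + p + l + 1 := by omega
  have a2 : triB (l + 2) + p = triB l + p + l + 1 + l + 2 := by omega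
  have a3 : triB (l + 1) + (p + 1) = triB l + p + l + 1 + 1 := by omega
  have a4 : triB (l + 2) + (p + 2) = triB l + p + l + 1 + l + 4 := by omega
  have a5 : triB l + (p + 1) = triB l + p + 1 := by ring
  have a6 : triB l + (p + 2) = triB l + p + 2 := by ring
  simp only [aMoveStep, emitF]
  split_ifs with hr hd hd
  · rw [aGet_tbl n l p hl (by omega) hp (by omega),
        aGet_tbl n (l+1) p (by omega) (by omega) hp (by omega),
        aGet_tbl n (l+2) p (by omega) (by omega) hp (by omega),
        aGet_tbl n (l+1) (p+1) (by omega) (by omega) (by omega) (by omega),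
        aGet_tbl n (l+2) (p+2) (by omega) (by omega) (by omega) (by omega),
        aGet_tbl n l (p+1) hl (by omega) (by omega) (by omega),
        aGet_tbl n l (p+2) hl (by omega) (by omega) (by omega),
        a1, a2, a3, a4, a5, a6]
    simp [List.append_assoc]
  · rw [aGet_tbl n l p hl (by omega) hp (by omega),
        aGet_tbl n l (p+1) hl (by omega) (by omega) (by omega),
        aGet_tbl n l (p+2) hl (by omega) (by omega) (by omega), a5, a6]
    simp
  · rw [aGet_tbl n l p hl (by omega) hp (by omega),
        aGet_tbl n (l+1) p (by omega) (by omega) hp (by omega),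
        aGet_tbl n (l+2) p (by omega) (by omega) hp (by omega),
        aGet_tbl n (l+1) (p+1) (by omega) (by omega) (by omega) (by omega),
        aGet_tbl n (l+2) (p+2) (by omega) (by omega) (by omega) (by omega),
        a1, a2, a3, a4]
    simp [List.append_assoc]
  · simp

theorem aMoves_eq_Fw (rows : Int) (n : Nat) (hn : rows = (n : Int)) :
    (PySem.List.pyRange 0 rows 1).foldl
      (fun acc l => (PySem.List.pyRange 0 (l + 1) 1).foldl
        (fun acc p => aMoveStep rows (tbl n) acc l p) acc) ([] : List (Int × Int × Int))
    = Fw rows n := by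
  have h1 : ∀ acc, (PySem.List.pyRange 0 rows 1).foldl
      (fun acc l => (PySem.List.pyRange 0 (l + 1) 1).foldl
        (fun acc p => aMoveStep rows (tbl n) acc l p) acc) acc
      = (PySem.List.pyRange 0 rows 1).foldl
        (fun acc l => acc ++ rowT rows l 0) acc := by
    intro acc
    apply PySem.List.foldl_congr_mem
    intro a l hl
    rw [PySem.List.mem_pyRange_one] at hl
    have h2 : (PySem.List.pyRange 0 (l + 1) 1).foldl
        (fun acc p => aMoveStep rows (tbl n) acc l p) a
        = (PySem.List.pyRange 0 (l + 1) 1).foldl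
          (fun acc p => acc ++ emitF rows l p (triB l + p)) a := by
      apply PySem.List.foldl_congr_mem
      intro a2 p hp
      rw [PySem.List.mem_pyRange_one] at hp
      exact aMoveStep_emit rows n l p hl.1 (by omega) hn hp.1 hp.2 a2
    rw [h2, PySem.List.foldl_append_eq_flatMap]
    rfl
  rw [h1, PySem.List.foldl_append_eq_flatMap, hn]
  simp [Fw]

theorem main_eq (rows : Int) : calcValidMoves rows = calcValidMoves_alt rows := by
  simp only [calcValidMoves, calcValidMoves_alt]
  by_cases hpos : 0 < rows
  · obtain ⟨n, hn⟩ : ∃ n : Nat, rows = (n : Int) :=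
      ⟨rows.toNat, (Int.toNat_of_nonneg (le_of_lt hpos)).symm⟩
    have hl : (PySem.List.pyRange 1 (rows + 1) 1).foldl aLevelStep ([], 0)
        = (tbl n, triB (n : Int)) := by rw [hn]; exact levelsLoop n
    rw [hl]
    rw [aMoves_eq_Fw rows n hn]
    rw [if_pos (by omega)]
    have htri : PySem.Int.floordiv (rows * (rows + 1)) 2 = triB (n : Int) := by
      rw [hn]; rfl
    rw [htri, flatFold rows n]
    rw [PySem.List.foldl_append_singleton_eq_map]
    rfl
  · rw [PySem.List.pyRange_one_eq_nil (show rows + 1 ≤ 1 by omega),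
        PySem.List.pyRange_one_eq_nil (show rows ≤ 0 by omega),
        if_neg (by omega)]
    simp [PySem.List.pyRange_one_eq_nil]

-- ===== VERDICT (by name: the statement is the Claim_ definition above) =====
theorem calcValidMoves_spec : Claim_equal_calcValidMoves := by
  intro rows _
  unfold Spec_calcValidMoves
  exact main_eq rows
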